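-- pv_equiv track=rewrite | github.com/ArvorCo/PNAD | scripts/pnad.py | _detect_income_col
-- ===== SOURCE A (Python) =====
-- from typing import Dict, Iterable, List, Optional, Sequence, Tuple
--
-- def _detect_income_col(headers: Sequence[str], requested: Optional[str]) -> str:
--     if requested:
--         if requested not in headers:
--             raise ValueError(f"income column not found: {requested}")
--         return requested
--     # Anual: renda domiciliar total (VD5001)
--     c = next((h for h in headers if h.startswith("VD5001")), None)
--     if c:
--         return c
--     # Trimestral: renda do trabalho (VD4020 ou VD4019)
--     c = next((h for h in headers if h.startswith("VD4020")), None)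
--     if c:
--         return c
--     c = next((h for h in headers if h.startswith("VD4019")), None)
--     if c:
--         return c
--     raise ValueError("could not auto-detect income column; use --income-col")
-- ===== SOURCE B (Python) =====
-- def _detect_income_col(headers, requested):
--     if requested:
--         if requested not in headers:
--             raise ValueError(f"income column not found: {requested}")
--         return requested
--     priority = ("VD5001", "VD4020", "VD4019")
--     best = None
--     best_rank = len(priority)
--     for h in headers:
--         for rank, p in enumerate(priority):
--             if h.startswith(p):
--                 if rank < best_rank:
--                     best, best_rank = h, rank
--                 break
--     if best is None:
--         raise ValueError("could not auto-detect income column; use --income-col")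
--     return best
-- ===== Notes on version B (the rewrite author's own statement) =====
-- stated objective: alternative
-- what changed: Replaces A's three sequential full scans (one per prefix) with a single pass over headers keeping the best (header, rank) seen so far under the prefix priority order.
import Mathlib
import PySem

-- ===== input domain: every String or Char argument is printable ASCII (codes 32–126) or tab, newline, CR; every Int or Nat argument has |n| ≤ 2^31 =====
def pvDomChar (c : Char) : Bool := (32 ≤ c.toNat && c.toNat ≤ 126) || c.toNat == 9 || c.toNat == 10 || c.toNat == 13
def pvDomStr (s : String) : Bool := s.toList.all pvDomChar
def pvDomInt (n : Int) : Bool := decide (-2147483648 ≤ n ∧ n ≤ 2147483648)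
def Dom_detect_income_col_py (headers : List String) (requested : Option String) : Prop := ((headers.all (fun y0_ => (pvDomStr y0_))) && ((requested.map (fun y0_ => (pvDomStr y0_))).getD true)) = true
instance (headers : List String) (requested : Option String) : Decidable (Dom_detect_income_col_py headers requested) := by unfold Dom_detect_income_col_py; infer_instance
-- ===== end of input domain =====

-- B replaces A's three sequential prefix scans with a single best-(header,rank) pass; return values are proved equal on Pre_.
-- ===== PORT A =====
-- auto-detect part of A: three sequential scans (next(...) then `if c:`); "" stands for the raise (excluded by Pre_)
def pvScan3A (headers : List String) : String :=
  match headers.find? (fun h => PySem.Str.startswith h "VD4019") with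
  | some c => if c ≠ "" then c else ""
  | none => ""

def pvScan2A (headers : List String) : String :=
  match headers.find? (fun h => PySem.Str.startswith h "VD4020") with
  | some c => if c ≠ "" then c else pvScan3A headers
  | none => pvScan3A headers

def pvScan1A (headers : List String) : String :=
  match headers.find? (fun h => PySem.Str.startswith h "VD5001") with
  | some c => if c ≠ "" then c else pvScan2A headers
  | none => pvScan2A headers

def detect_income_col_py (headers : List String) (requested : Option String) : String :=
  match requested with
  | some r =>
      if r ≠ "" then (if headers.contains r then r else "")   -- raise excluded by Pre_
      else pvScan1A headers
  | none => pvScan1A headers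

-- ===== PORT B =====
-- rank of the first priority prefix h starts with (3 = no match), mirroring Source B's inner enumerate loop
def pvRankB (h : String) : Nat :=
  if PySem.Str.startswith h "VD5001" then 0
  else if PySem.Str.startswith h "VD4020" then 1
  else if PySem.Str.startswith h "VD4019" then 2
  else 3

-- Source B's single pass: carry (best, best_rank)
def pvLoopB : List String → Option String → Nat → Option String
  | [], best, _ => best
  | h :: t, best, brank =>
      if pvRankB h < brank then pvLoopB t (some h) (pvRankB h) else pvLoopB t best brank

def detect_income_col_py_alt (headers : List String) (requested : Option String) : String :=
  match requested with
  | some r =>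
      if r ≠ "" then (if headers.contains r then r else "")   -- raise excluded by Pre_
      else match pvLoopB headers none 3 with
           | some b => b
           | none => ""                                        -- raise excluded by Pre_
  | none => match pvLoopB headers none 3 with
            | some b => b
            | none => ""

-- ===== PRECONDITION & SPEC =====
-- Pre_ excludes exactly the inputs where A raises ValueError: a truthy requested absent from
-- headers, or auto-detect mode with no header starting with any of the three prefixes.
def Pre_detect_income_col_py (headers : List String) (requested : Option String) : Prop :=
  (requested.getD "" ≠ "" → requested.getD "" ∈ headers) ∧
  (requested.getD "" = "" →
    ∃ h ∈ headers, (PySem.Str.startswith h "VD5001" ∨ PySem.Str.startswith h "VD4020" ∨ PySem.Str.startswith h "VD4019"))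

instance (headers : List String) (requested : Option String) : Decidable (Pre_detect_income_col_py headers requested) := by
  unfold Pre_detect_income_col_py; infer_instance

def pvWitness_detect_income_col_py : List String × Option String := (["UF", "VD4020_real"], none)

def Spec_detect_income_col_py (headers : List String) (requested : Option String) (out : String) : Prop := out = detect_income_col_py_alt headers requested
instance (headers : List String) (requested : Option String) (out : String) : Decidable (Spec_detect_income_col_py headers requested out) := by unfold Spec_detect_income_col_py; infer_instance

-- ===== CLAIM (what is proved, stated in full; the proofs are below) =====
def Claim_equal_detect_income_col_py : Prop := ∀ (headers : List String) (requested : Option String), Dom_detect_income_col_py headers requested → Pre_detect_income_col_py headers requested → Spec_detect_income_col_py headers requested (detect_income_col_py headers requested)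

-- ===== LEMMAS AND PROOFS =====

lemma pvLoop_zero (t : List String) (b : Option String) : pvLoopB t b 0 = b := by
  induction t with
  | nil => rfl
  | cons h t ih => simp [pvLoopB, ih]

lemma pvLoop_one (t : List String) (b : Option String) :
    pvLoopB t b 1 = (t.find? (fun h => PySem.Str.startswith h "VD5001")).or b := by
  induction t generalizing b with
  | nil => rfl
  | cons h t ih =>
    by_cases s0 : PySem.Chars.startswith h.toList ['V','D','5','0','0','1'] = true
    · have hr : pvRankB h = 0 := by unfold pvRankB; split_ifs <;> simp_all
      simp [pvLoopB, hr, pvLoop_zero, List.find?, s0]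
    · have hr : ¬ pvRankB h < 1 := by unfold pvRankB; split_ifs <;> simp_all
      simp [pvLoopB, hr, ih, List.find?, s0]

lemma pvLoop_two (t : List String) (b : Option String) :
    pvLoopB t b 2 = ((t.find? (fun h => PySem.Str.startswith h "VD5001")).or
      ((t.find? (fun h => PySem.Str.startswith h "VD4020")).or b)) := by
  induction t generalizing b with
  | nil => rfl
  | cons h t ih =>
    by_cases s0 : PySem.Chars.startswith h.toList ['V','D','5','0','0','1'] = true
    · have hr : pvRankB h = 0 := by unfold pvRankB; split_ifs <;> simp_all
      simp [pvLoopB, hr, pvLoop_zero, List.find?, s0]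
    · by_cases s1 : PySem.Chars.startswith h.toList ['V','D','4','0','2','0'] = true
      · have hr : pvRankB h = 1 := by unfold pvRankB; split_ifs <;> simp_all
        simp [pvLoopB, hr, pvLoop_one, List.find?, s0, s1]
      · have hr : ¬ pvRankB h < 2 := by unfold pvRankB; split_ifs <;> simp_all
        simp [pvLoopB, hr, ih, List.find?, s0, s1]

lemma pvLoop_three (t : List String) (b : Option String) :
    pvLoopB t b 3 = ((t.find? (fun h => PySem.Str.startswith h "VD5001")).or
      ((t.find? (fun h => PySem.Str.startswith h "VD4020")).or
        ((t.find? (fun h => PySem.Str.startswith h "VD4019")).or b))) := by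
  induction t generalizing b with
  | nil => rfl
  | cons h t ih =>
    by_cases s0 : PySem.Chars.startswith h.toList ['V','D','5','0','0','1'] = true
    · have hr : pvRankB h = 0 := by unfold pvRankB; split_ifs <;> simp_all
      simp [pvLoopB, hr, pvLoop_zero, List.find?, s0]
    · by_cases s1 : PySem.Chars.startswith h.toList ['V','D','4','0','2','0'] = true
      · have hr : pvRankB h = 1 := by unfold pvRankB; split_ifs <;> simp_all
        simp [pvLoopB, hr, pvLoop_one, List.find?, s0, s1]
      · by_cases s2 : PySem.Chars.startswith h.toList ['V','D','4','0','1','9'] = true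
        · have hr : pvRankB h = 2 := by unfold pvRankB; split_ifs <;> simp_all
          simp [pvLoopB, hr, pvLoop_two, List.find?, s0, s1, s2]
        · have hr : pvRankB h = 3 := by unfold pvRankB; split_ifs <;> simp_all
          simp [pvLoopB, hr, ih, List.find?, s0, s1, s2]

-- any header starting with one of the (nonempty) prefixes is nonempty
lemma pv_found_ne_empty (p c : String) (hp : PySem.Str.startswith "" p = false)
    (hc : PySem.Str.startswith c p = true) : c ≠ "" := by
  intro he; rw [he, hp] at hc; cases hc

lemma pv_auto_eq (headers : List String) :
    pvScan1A headers = (match pvLoopB headers none 3 with | some b => b | none => "") := by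
  rw [pvLoop_three]
  unfold pvScan1A pvScan2A pvScan3A
  cases h0 : headers.find? (fun h => PySem.Str.startswith h "VD5001") with
  | some c =>
    have hc := List.find?_some h0
    simp [pv_found_ne_empty "VD5001" c (by decide) hc]
  | none =>
    cases h1 : headers.find? (fun h => PySem.Str.startswith h "VD4020") with
    | some c =>
      have hc := List.find?_some h1
      simp [pv_found_ne_empty "VD4020" c (by decide) hc]
    | none =>
      cases h2 : headers.find? (fun h => PySem.Str.startswith h "VD4019") with
      | some c =>
        have hc := List.find?_some h2
        simp [pv_found_ne_empty "VD4019" c (by decide) hc]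
      | none => simp

-- ===== VERDICT (by name: the statement is the Claim_ definition above) =====
theorem detect_income_col_py_spec : Claim_equal_detect_income_col_py := by
  intro headers requested _ _
  unfold Spec_detect_income_col_py detect_income_col_py detect_income_col_py_alt
  cases requested with
  | none => exact pv_auto_eq headers
  | some r =>
    by_cases hr : r = "" <;> simp [hr, pv_auto_eq headers]
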